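-- pv_equiv track=rewrite | github.com/cuzic/ai-dev-yodoq | assets/templates/svg_templates/batch_convert.py | extract_slides
-- ===== SOURCE A (Python) =====
-- def extract_slides(md_content):
--     """Extract individual slides from markdown content."""
--     # Split by slide separators (---) or h1 headers
--     slides = []
--     current_slide = []
--
--     for line in md_content.split('\n'):
--         if line.strip() == '---':
--             if current_slide:
--                 slides.append('\n'.join(current_slide))
--                 current_slide = []
--         else:
--             current_slide.append(line)
--
--     # Add last slide
--     if current_slide:
--         slides.append('\n'.join(current_slide))
--
--     return slides
-- ===== SOURCE B (Python) =====
-- def extract_slides(md_content):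
--     """Extract individual slides from markdown content."""
--     lines = md_content.split('\n')
--     n = len(lines)
--     slides = []
--     i = 0
--     while i < n:
--         if lines[i].strip() == '---':
--             i += 1
--         else:
--             # scan the maximal run of non-separator lines starting at i
--             j = i + 1
--             while j < n and lines[j].strip() != '---':
--                 j += 1
--             slides.append('\n'.join(lines[i:j]))
--             i = j
--     return slides
-- ===== Notes on version B (the rewrite author's own statement) =====
-- stated objective: alternative
-- what changed: Replaces A's accumulate-and-flush state machine (growing a current_slide buffer line by line and flushing on separators and at the end) with a two-pointer run scanner that jumps to the next separator and emits each maximal non-separator run as one slice join.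
import Mathlib
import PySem

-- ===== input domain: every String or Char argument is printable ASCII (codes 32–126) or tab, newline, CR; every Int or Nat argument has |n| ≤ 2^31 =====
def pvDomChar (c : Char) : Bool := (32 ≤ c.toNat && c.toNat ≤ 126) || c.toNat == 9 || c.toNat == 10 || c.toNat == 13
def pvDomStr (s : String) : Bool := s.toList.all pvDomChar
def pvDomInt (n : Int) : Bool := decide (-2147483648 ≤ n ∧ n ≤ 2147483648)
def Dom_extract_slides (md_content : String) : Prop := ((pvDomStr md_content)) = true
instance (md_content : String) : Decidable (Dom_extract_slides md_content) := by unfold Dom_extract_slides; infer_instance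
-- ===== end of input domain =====

-- B replaces A's accumulate-and-flush state machine by a two-pointer run scanner
-- (jump to the next separator, emit each maximal non-separator run in one piece); alternative, not faster.

-- ===== PORT A =====
-- splitting on the literal "\n" (nonempty sep, so split? = some) -- A's loop: fold over the lines carrying (slides, current_slide); final flush after the loop.
def extract_slides (md_content : String) : List String :=
  let lines := (PySem.Str.split? md_content "\n").getD []
  let st := lines.foldl
    (fun (st : List String × List String) line =>
      if PySem.Str.strip line == "---" then
        if st.2 ≠ [] then (st.1 ++ [PySem.Str.join "\n" st.2], ([] : List String)) else st
      else (st.1, st.2 ++ [line]))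
    ([], [])
  if st.2 ≠ [] then st.1 ++ [PySem.Str.join "\n" st.2] else st.1

-- ===== PORT B =====
def pvIsSep (l : String) : Bool := PySem.Str.strip l == "---"

-- B's outer while over i: skip a separator, or (inner while over j = takeWhile/dropWhile to the
-- next separator) emit the run lines[i:j] joined; exact transcription of Source B's two-pointer scan.
def pvAltGo (lines : List String) : List String :=
  match lines with
  | [] => []
  | l :: rest =>
    if pvIsSep l then pvAltGo rest
    else PySem.Str.join "\n" (l :: rest.takeWhile (fun x => !pvIsSep x)) ::
         pvAltGo (rest.dropWhile (fun x => !pvIsSep x))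
termination_by lines.length
decreasing_by
  · simp
  · simpa using Nat.lt_succ_of_le (List.length_dropWhile_le (fun x => !pvIsSep x) rest)

def extract_slides_alt (md_content : String) : List String :=
  pvAltGo ((PySem.Str.split? md_content "\n").getD [])

-- ===== PRECONDITION & SPEC =====
def Spec_extract_slides (md_content : String) (out : List String) : Prop := out = extract_slides_alt md_content
instance (md_content : String) (out : List String) : Decidable (Spec_extract_slides md_content out) := by unfold Spec_extract_slides; infer_instance

-- ===== CLAIM (what is proved, stated in full; the proofs are below) =====
def Claim_equal_extract_slides : Prop := ∀ (md_content : String), Dom_extract_slides md_content → Spec_extract_slides md_content (extract_slides md_content)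

-- ===== LEMMAS AND PROOFS =====

-- A's loop body and final flush, named so the induction can speak about them.
def pvStep (st : List String × List String) (line : String) : List String × List String :=
  if PySem.Str.strip line == "---" then
    if st.2 ≠ [] then (st.1 ++ [PySem.Str.join "\n" st.2], ([] : List String)) else st
  else (st.1, st.2 ++ [line])

def pvFinish (st : List String × List String) : List String :=
  if st.2 ≠ [] then st.1 ++ [PySem.Str.join "\n" st.2] else st.1

-- A's behaviour with pending buffer cur on the remaining lines (the flush-machine, recursively).
def pvGo2 (cur : List String) (lines : List String) : List String :=
  match lines with
  | [] => if cur = [] then [] else [PySem.Str.join "\n" cur]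
  | l :: rest =>
    if pvIsSep l then (if cur = [] then [] else [PySem.Str.join "\n" cur]) ++ pvGo2 [] rest
    else pvGo2 (cur ++ [l]) rest

theorem pvFold_eq_go2 (lines : List String) (slides cur : List String) :
    pvFinish (List.foldl pvStep (slides, cur) lines) = slides ++ pvGo2 cur lines := by
  induction lines generalizing slides cur with
  | nil =>
    by_cases h : cur = [] <;> simp [pvFinish, pvGo2, h]
  | cons l rest ih =>
    rw [List.foldl_cons]
    by_cases hs : (PySem.Str.strip l == "---") = true
    · by_cases hc : cur = []
      · rw [show pvStep (slides, cur) l = (slides, cur) by simp [pvStep, hs, hc]]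
        rw [ih, hc]
        simp [pvGo2, pvIsSep, hs]
      · rw [show pvStep (slides, cur) l
              = (slides ++ [PySem.Str.join "\n" cur], ([] : List String)) by
            simp [pvStep, hs, hc]]
        rw [ih]
        simp [pvGo2, pvIsSep, hs, hc]
    · rw [show pvStep (slides, cur) l = (slides, cur ++ [l]) by simp [pvStep, hs]]
      rw [ih]
      simp [pvGo2, pvIsSep, hs]

theorem pvAltGo_unfold (ls : List String) :
    pvAltGo ls = (if ls.takeWhile (fun x => !pvIsSep x) = [] then []
                  else [PySem.Str.join "\n" (ls.takeWhile (fun x => !pvIsSep x))]) ++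
                 pvAltGo (ls.dropWhile (fun x => !pvIsSep x)) := by
  match ls with
  | [] => simp [pvAltGo]
  | l :: rest =>
    by_cases hs : pvIsSep l = true
    · simp [pvAltGo, hs]
    · simp [pvAltGo, hs]

theorem pvGo2_eq_altGo (lines : List String) (cur : List String) :
    pvGo2 cur lines =
      (if cur ++ lines.takeWhile (fun x => !pvIsSep x) = [] then []
       else [PySem.Str.join "\n" (cur ++ lines.takeWhile (fun x => !pvIsSep x))]) ++
      pvAltGo (lines.dropWhile (fun x => !pvIsSep x)) := by
  induction lines generalizing cur with
  | nil =>
    by_cases h : cur = [] <;> simp [pvGo2, pvAltGo, h]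
  | cons l rest ih =>
    by_cases hs : pvIsSep l = true
    · rw [show pvGo2 cur (l :: rest)
            = (if cur = [] then [] else [PySem.Str.join "\n" cur]) ++ pvGo2 [] rest by
          simp [pvGo2, hs]]
      rw [ih []]
      rw [List.nil_append, ← pvAltGo_unfold rest]
      simp [hs, pvAltGo]
    · rw [show pvGo2 cur (l :: rest) = pvGo2 (cur ++ [l]) rest by simp [pvGo2, hs]]
      rw [ih (cur ++ [l])]
      simp [hs, List.append_assoc]

-- ===== VERDICT (by name: the statement is the Claim_ definition above) =====
theorem extract_slides_spec : Claim_equal_extract_slides := by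
  intro md _
  unfold Spec_extract_slides
  show pvFinish (List.foldl pvStep ([], [])
        ((PySem.Str.split? md "\n").getD [])) = extract_slides_alt md
  rw [pvFold_eq_go2, List.nil_append, pvGo2_eq_altGo, List.nil_append, ← pvAltGo_unfold]
  rfl
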